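-- pv_equiv track=rewrite | github.com/Choi-Jinwoo/Algorithm | 프로그래머스/신규 아이디 추천/main.py | merge_period
-- ===== SOURCE A (Python) =====
-- def merge_period(id: str):
--     stack = []
--     for i in range(len(id)):
--         if len(stack) > 0 and stack[-1] == '.' and id[i] == '.':
--             stack.pop()
--
--         stack.append(id[i])
--
--     if len(stack) > 0 and stack[0] == '.':
--         del stack[0]
--
--     if len(stack) > 0 and stack[-1] == '.':
--         del stack[-1]
--
--     return ''.join(stack)
-- ===== SOURCE B (Python) =====
-- def merge_period(id: str):
--     return '.'.join(p for p in id.split('.') if p)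
-- ===== Notes on version B (the rewrite author's own statement) =====
-- stated objective: idiomatic
-- what changed: Replaces the character-by-character stack loop plus two one-sided dot strips with a one-shot split on the dot, a filter dropping the empty tokens, and a dot-join.
import Mathlib
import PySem

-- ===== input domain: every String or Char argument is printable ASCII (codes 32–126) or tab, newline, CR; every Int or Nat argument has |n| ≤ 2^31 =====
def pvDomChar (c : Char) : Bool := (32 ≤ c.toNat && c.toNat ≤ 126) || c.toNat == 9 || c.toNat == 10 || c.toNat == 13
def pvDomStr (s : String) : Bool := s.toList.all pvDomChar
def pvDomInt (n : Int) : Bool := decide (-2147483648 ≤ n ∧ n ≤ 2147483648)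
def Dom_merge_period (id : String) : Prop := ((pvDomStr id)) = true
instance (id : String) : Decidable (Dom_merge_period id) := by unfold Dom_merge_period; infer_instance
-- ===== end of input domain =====

-- B replaces A's character-stack loop (collapse dot runs, strip one leading/trailing dot)
-- with a split-on-'.' / drop-empty-tokens / join-with-'.' pass; same result, more idiomatic.

-- ===== PORT A =====
def mpStep (stack : List Char) (c : Char) : List Char :=
  let stack := if stack.length > 0 ∧ PySem.List.pyGet? stack (-1) = some '.' ∧ c = '.' then
    stack.dropLast else stack   -- stack.pop()
  stack ++ [c]                  -- stack.append(id[i])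

def merge_period (id : String) : String :=
  let stack := id.toList.foldl mpStep []
  let stack := if stack.length > 0 ∧ PySem.List.pyGet? stack 0 = some '.' then
    List.drop 1 stack else stack    -- del stack[0]
  let stack := if stack.length > 0 ∧ PySem.List.pyGet? stack (-1) = some '.' then
    stack.dropLast else stack       -- del stack[-1]
  String.mk stack                   -- ''.join(stack)

-- ===== PORT B =====
def merge_period_alt (id : String) : String :=
  String.mk (PySem.Chars.join ['.']
    ((PySem.Chars.splitOn id.toList ['.']).filter (fun p => p ≠ ([] : List Char))))

-- ===== PRECONDITION & SPEC =====
def Spec_merge_period (id : String) (out : String) : Prop := out = merge_period_alt id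
instance (id : String) (out : String) : Decidable (Spec_merge_period id out) := by unfold Spec_merge_period; infer_instance

-- ===== CLAIM (what is proved, stated in full; the proofs are below) =====
def Claim_equal_merge_period : Prop := ∀ (id : String), Dom_merge_period id → Spec_merge_period id (merge_period id)

-- ===== LEMMAS AND PROOFS =====

-- A's loop with the stack replaced by "chars emitted so far" + a last-emitted-was-a-dot flag.
def mpRun : Bool → List Char → List Char
  | _, [] => []
  | prevDot, c :: rest =>
    if prevDot ∧ c = '.' then mpRun prevDot rest else c :: mpRun (c = '.') rest

lemma pyGet_neg_one (s : List Char) (h : s ≠ []) :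
    PySem.List.pyGet? s (-1) = s.getLast? := by
  have hn : 0 < s.length := List.length_pos_iff.mpr h
  simp only [PySem.List.pyGet?, PySem.List.pyIdx?]
  have h1 : ¬ ((0:Int) ≤ -1) := by omega
  have h2 : -(s.length:Int) ≤ -1 := by omega
  rw [if_neg h1, if_pos h2]
  simp [List.getLast?_eq_getElem?]

lemma mpStep_eq (s : List Char) (c : Char) :
    mpStep s c = if s.getLast? = some '.' ∧ c = '.' then s.dropLast ++ [c] else s ++ [c] := by
  rcases eq_or_ne s [] with rfl | h
  · simp [mpStep]
  · have hn : 0 < s.length := List.length_pos_iff.mpr h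
    simp only [mpStep, pyGet_neg_one s h, hn, true_and]
    split_ifs <;> rfl

lemma foldl_mpStep (l : List Char) : ∀ s : List Char,
    l.foldl mpStep s = s ++ mpRun (s.getLast? = some '.') l := by
  induction l with
  | nil => intro s; simp [mpRun]
  | cons c rest ih =>
    intro s
    rw [List.foldl_cons, mpStep_eq]
    by_cases hc : c = '.'
    · subst hc
      by_cases hd : s.getLast? = some '.'
      · have hrestore : s.dropLast ++ ['.'] = s := by
          conv_rhs => rw [← List.dropLast_append_getLast? '.' hd]
        rw [if_pos ⟨hd, rfl⟩, hrestore, ih s]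
        simp [mpRun, hd]
      · rw [if_neg (by simp [hd]), ih (s ++ ['.'])]
        simp [mpRun, hd]
    · rw [if_neg (by simp [hc]), ih (s ++ [c])]
      simp [mpRun, hc]

lemma splitOn_go_eq (fuel : Nat) : ∀ (l cur : List Char) (acc : List (List Char)), l.length ≤ fuel →
    PySem.Chars.splitOn.go ['.'] fuel l cur acc
      = acc.reverse ++ (List.splitOn '.' l).modifyHead (cur.reverse ++ ·) := by
  induction fuel with
  | zero =>
    intro l cur acc h
    have : l = [] := List.length_eq_zero_iff.mp (Nat.le_zero.mp h)
    subst this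
    rw [PySem.Chars.splitOn.go.eq_def]
    simp [List.splitOn_nil]
  | succ fuel ih =>
    intro l cur acc h
    cases l with
    | nil =>
      rw [PySem.Chars.splitOn.go.eq_def]
      simp [List.splitOn_nil]
    | cons c rest =>
      rw [PySem.Chars.splitOn.go.eq_def]
      by_cases hc : c = '.'
      · subst hc
        have hpre : List.isPrefixOf ['.'] ('.' :: rest) = true := by
          simp [List.isPrefixOf]
        simp only [hpre, if_pos, List.length_cons, List.length_nil, Nat.zero_add,
          List.drop_succ_cons, List.drop_nil, List.drop_zero]
        rw [ih rest [] (cur.reverse :: acc) (by simpa using Nat.le_of_succ_le_succ h)]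
        have hsp : List.splitOn '.' ('.' :: rest) = [] :: List.splitOn '.' rest := by
          show List.splitOnP _ _ = _
          rw [List.splitOnP_cons]; simp; rfl
        rw [hsp]
        cases hrs : List.splitOn '.' rest <;> simp [List.splitOn] at hrs <;> simp [List.modifyHead]
      · have hpre : List.isPrefixOf ['.'] (c :: rest) = false := by
          simp [List.isPrefixOf]; exact fun h => hc h.symm
        simp only [hpre]
        rw [if_neg (by simp [eq_comm])]
        rw [ih rest (c :: cur) acc (by simpa using Nat.le_of_succ_le_succ h)]
        have : List.splitOn '.' (c :: rest) = (List.splitOn '.' rest).modifyHead (c :: ·) := by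
          show List.splitOnP _ _ = _
          rw [List.splitOnP_cons]; simp [hc]; rfl
        rw [this]
        cases hrs : List.splitOn '.' rest <;> simp [List.splitOn] at hrs <;> simp [List.modifyHead]

lemma pyGet_zero (s : List Char) (h : s ≠ []) :
    PySem.List.pyGet? s 0 = s.head? := by
  have hn : 0 < s.length := List.length_pos_iff.mpr h
  simp [PySem.List.pyGet?, PySem.List.pyIdx?, hn, List.head?_eq_getElem?]

lemma chars_splitOn_eq (l : List Char) :
    PySem.Chars.splitOn l ['.'] = List.splitOn '.' l := by
  show PySem.Chars.splitOn.go ['.'] (l.length + 1) l [] [] = _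
  rw [splitOn_go_eq (l.length + 1) l [] [] (Nat.le_succ _)]
  cases List.splitOn '.' l <;> simp [List.modifyHead]

def jcat : List (List Char) → List Char
  | [] => []
  | t :: ts => if t = [] then jcat ts
               else t ++ (if jcat ts = [] then [] else '.' :: jcat ts)

lemma icat_cons (x : List Char) (xs : List (List Char)) :
    ['.'].intercalate (x :: xs) = x ++ (if xs = [] then [] else '.' :: ['.'].intercalate xs) := by
  cases xs <;> simp [List.intercalate, List.intersperse]

lemma icat_filter_eq_nil (ts : List (List Char)) :
    ['.'].intercalate (ts.filter (fun p => p ≠ ([] : List Char))) = []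
      ↔ ts.filter (fun p => p ≠ ([] : List Char)) = [] := by
  constructor
  · intro h
    cases hf : ts.filter (fun p => p ≠ ([] : List Char)) with
    | nil => rfl
    | cons x rest =>
      have hx : x ≠ [] := by
        have := List.of_mem_filter (a := x) (l := ts) (by rw [hf]; exact List.mem_cons_self)
        simpa using this
      rw [hf, icat_cons] at h
      rcases List.append_eq_nil_iff.mp h with ⟨hx', -⟩
      exact absurd hx' hx
  · intro h; rw [h]; rfl

lemma jcat_eq_intercalate (ts : List (List Char)) :
    jcat ts = ['.'].intercalate (ts.filter (fun p => p ≠ ([] : List Char))) := by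
  induction ts with
  | nil => simp [jcat]; rfl
  | cons t us ih =>
    by_cases ht : t = []
    · simp [jcat, ht, ih]
    · rw [List.filter_cons_of_pos (by simpa using ht), icat_cons]
      show (if t = [] then jcat us
        else t ++ (if jcat us = [] then [] else '.' :: jcat us)) = _
      rw [if_neg ht, ih]
      by_cases hz : us.filter (fun p => p ≠ ([] : List Char)) = []
      · rw [if_pos ((icat_filter_eq_nil us).mpr hz), if_pos hz]
      · rw [if_neg (fun h => hz ((icat_filter_eq_nil us).mp h)), if_neg hz]

def stripT (m : List Char) : List Char :=
  if m.getLast? = some '.' then m.dropLast else m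

def Jtok (l : List Char) : List Char := jcat (List.splitOn '.' l)

lemma splitOn_ne_nil (l : List Char) : List.splitOn '.' l ≠ [] := by
  show List.splitOnP _ _ ≠ []
  induction l with
  | nil => simp [List.splitOnP_nil]
  | cons c r ih =>
    rw [List.splitOnP_cons]
    split_ifs
    · simp
    · cases h : List.splitOnP (fun x => x == '.') r
      · exact absurd h ih
      · simp [List.modifyHead]

lemma splitOn_dot (r : List Char) :
    List.splitOn '.' ('.' :: r) = [] :: List.splitOn '.' r := by
  show List.splitOnP _ _ = _
  rw [List.splitOnP_cons]; simp; rfl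

lemma splitOn_nondot {c : Char} (hc : c ≠ '.') (r : List Char) :
    List.splitOn '.' (c :: r) = (List.splitOn '.' r).modifyHead (c :: ·) := by
  show List.splitOnP _ _ = _
  rw [List.splitOnP_cons]; simp [hc]; rfl

lemma Jtok_dot (r : List Char) : Jtok ('.' :: r) = Jtok r := by
  rw [Jtok, splitOn_dot]; simp [jcat, Jtok]

lemma mpRun_true_eq_nil_iff (l : List Char) : mpRun true l = [] ↔ Jtok l = [] := by
  induction l with
  | nil => simp [mpRun, Jtok, jcat]
  | cons c r ih =>
    by_cases hc : c = '.'
    · subst hc; simpa [mpRun, Jtok_dot] using ih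
    · simp only [mpRun]
      rw [if_neg (by simp [hc])]
      obtain ⟨t, ts, hts⟩ : ∃ t ts, List.splitOn '.' r = t :: ts := by
        cases h : List.splitOn '.' r with
        | nil => exact absurd h (splitOn_ne_nil r)
        | cons t ts => exact ⟨t, ts, rfl⟩
      rw [Jtok, splitOn_nondot hc, hts]
      simp [List.modifyHead, jcat, hc]

lemma mpRun_false_nil_iff (l : List Char) : mpRun false l = [] ↔ l = [] := by
  cases l with
  | nil => simp [mpRun]
  | cons c r => simp [mpRun]

lemma stripT_cons (a : Char) (x : List Char) (h : x ≠ []) :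
    stripT (a :: x) = a :: stripT x := by
  cases x with
  | nil => exact absurd rfl h
  | cons y ys =>
    unfold stripT
    rw [List.getLast?_cons_cons, List.dropLast_cons₂]
    split_ifs <;> rfl

lemma splitOn_head_of_ne_nil {r : List Char} {t : List Char} {ts : List (List Char)}
    (hr : r ≠ []) (h : List.splitOn '.' r = t :: ts) :
    (t = [] ↔ r.head? = some '.') := by
  cases r with
  | nil => exact absurd rfl hr
  | cons c r' =>
    by_cases hc : c = '.'
    · subst hc
      rw [splitOn_dot] at h
      simp at h
      simp [h.1]
    · rw [splitOn_nondot hc] at h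
      obtain ⟨t', ts', hts⟩ : ∃ t' ts', List.splitOn '.' r' = t' :: ts' := by
        cases h2 : List.splitOn '.' r' with
        | nil => exact absurd h2 (splitOn_ne_nil r')
        | cons a b => exact ⟨a, b, rfl⟩
      rw [hts] at h
      simp [List.modifyHead] at h
      simp [← h.1, hc]

lemma main_core {c : Char} (hc : c ≠ '.') (r : List Char)
    (ihA1 : stripT (mpRun false r)
      = (if r.head? = some '.' ∧ Jtok r ≠ [] then ['.'] else []) ++ Jtok r) :
    stripT (c :: mpRun false r) = Jtok (c :: r) := by
  rcases eq_or_ne r [] with rfl | hr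
  · show stripT [c] = Jtok [c]
    have h1 : stripT [c] = [c] := by simp [stripT, hc]
    have h2 : Jtok [c] = [c] := by
      rw [Jtok, splitOn_nondot hc]
      simp [List.splitOn, List.splitOnP_nil, List.modifyHead, jcat]
    rw [h1, h2]
  · have hmr : mpRun false r ≠ [] := fun h => hr ((mpRun_false_nil_iff r).mp h)
    rw [stripT_cons c _ hmr, ihA1]
    obtain ⟨t, ts, hts⟩ : ∃ t ts, List.splitOn '.' r = t :: ts := by
      cases h2 : List.splitOn '.' r with
      | nil => exact absurd h2 (splitOn_ne_nil r)
      | cons a b => exact ⟨a, b, rfl⟩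
    have hJr : Jtok r = jcat (t :: ts) := by rw [Jtok, hts]
    have hJc : Jtok (c :: r) = jcat ((c :: t) :: ts) := by
      rw [Jtok, splitOn_nondot hc, hts]; rfl
    by_cases ht : t = []
    · subst ht
      have hhead : r.head? = some '.' := (splitOn_head_of_ne_nil hr hts).mp rfl
      have hJr' : Jtok r = jcat ts := by rw [hJr]; simp [jcat]
      rw [hJc, hJr']
      by_cases hz : jcat ts = []
      · simp [jcat, hz, hhead]
      · simp [jcat, hz, hhead]
    · have hhead : ¬ r.head? = some '.' := fun h =>
        ht ((splitOn_head_of_ne_nil hr hts).mpr h)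
      rw [hJc, hJr]
      simp only [jcat, if_neg ht, if_neg (by simp : ¬ (c :: t = []))]
      simp [hhead]

lemma main_strip (l : List Char) :
    (stripT (mpRun false l)
      = (if l.head? = some '.' ∧ Jtok l ≠ [] then ['.'] else []) ++ Jtok l)
    ∧ stripT (mpRun true l) = Jtok l := by
  induction l with
  | nil => constructor <;> simp [mpRun, stripT, Jtok, jcat, List.splitOn, List.splitOnP_nil]
  | cons c r ih =>
    obtain ⟨ihA1, ihA2⟩ := ih
    by_cases hc : c = '.'
    · subst hc
      constructor
      · show stripT (if _ ∧ _ then _ else ('.' :: mpRun _ r)) = _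
        rw [if_neg (by simp), show mpRun (decide ('.' = '.')) r = mpRun true r from by norm_num]
        by_cases hx : mpRun true r = []
        · have hJ : Jtok r = [] := (mpRun_true_eq_nil_iff r).mp hx
          rw [hx]
          simp [stripT, Jtok_dot, hJ]
        · rw [stripT_cons _ _ hx, ihA2, Jtok_dot]
          have hJ : Jtok r ≠ [] := fun h => hx ((mpRun_true_eq_nil_iff r).mpr h)
          simp [hJ]
      · show stripT (if _ ∧ _ then mpRun true r else _) = _
        rw [if_pos (by simp), ihA2, Jtok_dot]
    · constructor
      · show stripT (if _ ∧ _ then _ else (c :: mpRun (c = '.') r)) = _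
        rw [if_neg (by simp [hc])]
        have : mpRun (c = '.') r = mpRun false r := by simp [hc]
        rw [this, main_core hc r ihA1]
        simp [hc]
      · show stripT (if _ ∧ _ then _ else (c :: mpRun (c = '.') r)) = _
        rw [if_neg (by simp [hc])]
        have : mpRun (c = '.') r = mpRun false r := by simp [hc]
        rw [this, main_core hc r ihA1]

-- A's two 'del' statements, as functions of the stack.
def stripL (m : List Char) : List Char :=
  if m.length > 0 ∧ PySem.List.pyGet? m 0 = some '.' then List.drop 1 m else m

lemma stripT_eq_port (m : List Char) :
    (if m.length > 0 ∧ PySem.List.pyGet? m (-1) = some '.' then m.dropLast else m) = stripT m := by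
  rcases eq_or_ne m [] with rfl | h
  · simp [stripT]
  · have hn : 0 < m.length := List.length_pos_iff.mpr h
    rw [pyGet_neg_one m h]
    simp [stripT, hn]

lemma final_chars (l : List Char) : stripT (stripL (mpRun false l)) = Jtok l := by
  cases l with
  | nil => simp [mpRun, stripL, stripT, Jtok, jcat, List.splitOn, List.splitOnP_nil]
  | cons c r =>
    have hm : mpRun false (c :: r) = c :: mpRun (c = '.') r := by
      show (if false = true ∧ c = '.' then _ else _) = _
      rw [if_neg (by simp)]
    by_cases hc : c = '.'
    · subst hc
      have : mpRun (decide ('.' = '.')) r = mpRun true r := by norm_num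
      rw [hm, this]
      have hL : stripL ('.' :: mpRun true r) = mpRun true r := by
        unfold stripL
        rw [if_pos ⟨by simp, by rw [pyGet_zero _ (by simp)]; rfl⟩]
        rfl
      rw [hL, (main_strip r).2, Jtok_dot]
    · have : mpRun (decide (c = '.')) r = mpRun false r := by simp [hc]
      rw [hm, this]
      have hL : stripL (c :: mpRun false r) = c :: mpRun false r := by
        unfold stripL
        rw [if_neg]
        rintro ⟨-, hg⟩
        rw [pyGet_zero _ (by simp)] at hg
        simp at hg
        exact hc hg
      rw [hL, main_core hc r (main_strip r).1]

-- ===== VERDICT (by name: the statement is the Claim_ definition above) =====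
theorem merge_period_spec : Claim_equal_merge_period := by
  intro id _
  unfold Spec_merge_period merge_period merge_period_alt
  rw [foldl_mpStep]
  simp only [List.nil_append, List.getLast?_nil, reduceCtorEq, decide_false]
  rw [stripT_eq_port]
  have hB : PySem.Chars.join ['.']
      ((PySem.Chars.splitOn id.toList ['.']).filter (fun p => p ≠ ([] : List Char)))
      = Jtok id.toList := by
    rw [chars_splitOn_eq]
    show ['.'].intercalate _ = _
    rw [Jtok, jcat_eq_intercalate]
  rw [hB, ← final_chars id.toList]
  rfl
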